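-- pv_equiv track=rewrite | github.com/ROSQUILLAS-CALENAS/FARFAN-ULTIMATE-main | normalizer.py | _create_offset_map
-- ===== SOURCE A (Python) =====
-- from typing import List, Tuple
--
-- def _create_offset_map(text: str) -> List[Tuple[int, int]]:
--     """Crea mapa de offsets original→normalizado"""
--     offset_map = []
--     current_pos = 0
--
--     for i, char in enumerate(text):
--         offset_map.append((i, current_pos))
--         if not char.isspace() or char in [' ', '\n']:
--             current_pos += 1
--
--     return offset_map
-- ===== SOURCE B (Python) =====
-- from typing import List, Tuple
--
-- def _create_offset_map(text: str) -> List[Tuple[int, int]]: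
--     """Segment decomposition: locate the skipped-whitespace positions, then emit
--     arithmetic segments (i, i - k) between consecutive skip positions, where k is
--     the number of skips already passed."""
--     skips = [i for i, c in enumerate(text) if c.isspace() and c not in (' ', '\n')]
--     out = []
--     prev = 0
--     for k, j in enumerate(skips):
--         out.extend((i, i - k) for i in range(prev, j + 1))
--         prev = j + 1
--     out.extend((i, i - len(skips)) for i in range(prev, len(text)))
--     return out
-- ===== Notes on version B (the rewrite author's own statement) =====
-- stated objective: alternative
-- what changed: Instead of one per-character pass with a running counter, B first locates the positions of skipped whitespace, then an outer loop over those positions emits whole arithmetic segments (i, i - k) between consecutive skips, k being the number of skips passed.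
import Mathlib
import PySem

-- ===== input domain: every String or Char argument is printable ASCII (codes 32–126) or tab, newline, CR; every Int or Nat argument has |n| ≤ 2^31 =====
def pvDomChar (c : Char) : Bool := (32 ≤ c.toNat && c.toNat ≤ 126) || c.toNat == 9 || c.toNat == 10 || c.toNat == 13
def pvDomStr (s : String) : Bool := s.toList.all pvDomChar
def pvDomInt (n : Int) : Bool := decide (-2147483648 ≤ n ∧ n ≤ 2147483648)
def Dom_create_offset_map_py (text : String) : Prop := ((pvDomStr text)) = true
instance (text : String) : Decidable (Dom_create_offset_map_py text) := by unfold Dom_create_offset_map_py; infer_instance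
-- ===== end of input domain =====

-- B replaces A's per-character running-counter pass by segmentation: it locates the
-- skipped-whitespace positions first and then emits whole arithmetic segments between
-- consecutive skips (alternative decomposition, same cost).

-- ===== PORT A =====
def create_offset_map_py (text : String) : List (Int × Int) :=
  ((PySem.List.enumerate text.toList 0).foldl
    (fun (st : List (Int × Int) × Int) ic =>
      let offset_map := st.1 ++ [(ic.1, st.2)]
      if !(PySem.Chars.isspace ic.2) || (ic.2 == ' ' || ic.2 == '\n') then
        (offset_map, st.2 + 1)
      else
        (offset_map, st.2))
    ([], 0)).1

-- ===== PORT B =====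
-- helper for B: the skip test 'c.isspace() and c not in (' ', '\n')'
def pvSkip (c : Char) : Bool := PySem.Chars.isspace c && !(c == ' ' || c == '\n')

def create_offset_map_py_alt (text : String) : List (Int × Int) :=
  let skips : List Int :=
    ((PySem.List.enumerate text.toList 0).filter (fun ic => pvSkip ic.2)).map Prod.fst
  let st := (PySem.List.enumerate skips 0).foldl
    (fun (st : List (Int × Int) × Int) kj =>
      (st.1 ++ (PySem.List.pyRange st.2 (kj.2 + 1) 1).map (fun i => (i, i - kj.1)), kj.2 + 1))
    ([], 0)
  st.1 ++ (PySem.List.pyRange st.2 (PySem.Str.len text) 1).map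
      (fun i => (i, i - (skips.length : Int)))

-- ===== PRECONDITION & SPEC =====
def Spec_create_offset_map_py (text : String) (out : List (Int × Int)) : Prop := out = create_offset_map_py_alt text
instance (text : String) (out : List (Int × Int)) : Decidable (Spec_create_offset_map_py text out) := by unfold Spec_create_offset_map_py; infer_instance

-- ===== CLAIM (what is proved, stated in full; the proofs are below) =====
def Claim_equal_create_offset_map_py : Prop := ∀ (text : String), Dom_create_offset_map_py text → Spec_create_offset_map_py text (create_offset_map_py text)

-- ===== LEMMAS AND PROOFS =====

-- The common intermediate form: pairs (i, pos) with pos advancing except on skips.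
def pvBuild : List Char → Int → Int → List (Int × Int)
  | [], _, _ => []
  | c :: rest, s, pos => (s, pos) :: pvBuild rest (s + 1) (if pvSkip c then pos else pos + 1)

-- skip positions of cs when scanning starts at index s (B's comprehension, generalized)
def pvSkips (cs : List Char) (s : Int) : List Int :=
  ((PySem.List.enumerate cs s).filter (fun ic => pvSkip ic.2)).map Prod.fst

-- B's remaining computation, generalized over consumed-skip count k and start prev.
def pvBgen (sk : List Int) (k prev fin : Int) (acc : List (Int × Int)) : List (Int × Int) :=
  let st := (PySem.List.enumerate sk k).foldl
    (fun (st : List (Int × Int) × Int) kj =>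
      (st.1 ++ (PySem.List.pyRange st.2 (kj.2 + 1) 1).map (fun i => (i, i - kj.1)), kj.2 + 1))
    (acc, prev)
  st.1 ++ (PySem.List.pyRange st.2 fin 1).map (fun i => (i, i - (k + (sk.length : Int))))

-- A's condition is the negation of the skip test.
theorem pvACond (c : Char) :
    (!(PySem.Chars.isspace c) || (c == ' ' || c == '\n')) = !pvSkip c := by
  cases h1 : PySem.Chars.isspace c <;> cases h2 : (c == ' ' || c == '\n') <;>
    simp [pvSkip, h1, h2]

-- A's fold computes pvBuild.
theorem pvA_loop (cs : List Char) : ∀ (s : Int) (acc : List (Int × Int)) (pos : Int),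
    ((PySem.List.enumerate cs s).foldl
      (fun (st : List (Int × Int) × Int) ic =>
        let offset_map := st.1 ++ [(ic.1, st.2)]
        if !(PySem.Chars.isspace ic.2) || (ic.2 == ' ' || ic.2 == '\n') then
          (offset_map, st.2 + 1)
        else
          (offset_map, st.2))
      (acc, pos)).1
    = acc ++ pvBuild cs s pos := by
  induction cs with
  | nil => intro s acc pos; simp [PySem.List.enumerate, pvBuild]
  | cons c rest ih =>
      intro s acc pos
      rw [PySem.List.enumerate_cons]
      simp only [List.foldl_cons]
      by_cases h : pvSkip c = true
      · have hc := pvACond c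
        rw [h] at hc
        simp only [hc, Bool.not_true]
        rw [if_neg (by simp : ¬ (false = true))]
        rw [ih (s + 1) (acc ++ [(s, pos)]) pos]
        simp [pvBuild, h]
      · simp only [Bool.not_eq_true] at h
        have hc := pvACond c
        rw [h] at hc
        simp only [hc, Bool.not_false]
        rw [if_pos trivial]
        rw [ih (s + 1) (acc ++ [(s, pos)]) (pos + 1)]
        simp [pvBuild, h]

theorem pvSkips_nil (s : Int) : pvSkips [] s = [] := by
  simp [pvSkips, PySem.List.enumerate]

theorem pvSkips_cons (c : Char) (rest : List Char) (s : Int) :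
    pvSkips (c :: rest) s
      = (if pvSkip c then [s] else []) ++ pvSkips rest (s + 1) := by
  by_cases h : pvSkip c = true <;>
    simp [pvSkips, PySem.List.enumerate_cons, h]

theorem pvSkips_ge (cs : List Char) : ∀ (s j : Int), j ∈ pvSkips cs s → s ≤ j := by
  induction cs with
  | nil => intro s j h; simp [pvSkips_nil] at h
  | cons c rest ih =>
      intro s j h
      rw [pvSkips_cons] at h
      rcases List.mem_append.mp h with h1 | h2
      · by_cases hc : pvSkip c = true
        · simp [hc] at h1; omega
        · simp [hc] at h1
      · have := ih (s + 1) j h2; omega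

-- Popping one non-skip position at prev off the front of pvBgen.
theorem pvBgen_pop (sk : List Int) (k prev fin : Int) (acc : List (Int × Int))
    (hge : ∀ j ∈ sk, prev + 1 ≤ j) (hfin : prev < fin) :
    pvBgen sk k prev fin acc = pvBgen sk k (prev + 1) fin (acc ++ [(prev, prev - k)]) := by
  cases sk with
  | nil =>
      simp only [pvBgen, PySem.List.enumerate, List.foldl_nil, List.length_nil]
      rw [PySem.List.pyRange_one_cons hfin]
      simp
  | cons j sk' =>
      have hj : prev + 1 ≤ j := hge j (List.mem_cons_self ..)
      simp only [pvBgen, PySem.List.enumerate_cons, List.foldl_cons]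
      rw [PySem.List.pyRange_one_cons (by omega : prev < j + 1)]
      simp

-- Consuming a skip at position prev.
theorem pvBgen_skip (sk' : List Int) (k prev fin : Int) (acc : List (Int × Int)) :
    pvBgen (prev :: sk') k prev fin acc
      = pvBgen sk' (k + 1) (prev + 1) fin (acc ++ [(prev, prev - k)]) := by
  simp only [pvBgen, PySem.List.enumerate_cons, List.foldl_cons]
  rw [PySem.List.pyRange_one_cons (by omega : prev < prev + 1),
      PySem.List.pyRange_one_eq_nil (by omega : prev + 1 ≤ prev + 1)]
  have hc : (k + ((sk'.length + 1 : Nat) : Int)) = (k + 1) + (sk'.length : Int) := by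
    push_cast; ring
  simp only [List.length_cons, hc]
  simp

-- Main invariant: B's generalized computation equals pvBuild.
theorem pvB_main (cs : List Char) : ∀ (prev k : Int) (acc : List (Int × Int)),
    pvBgen (pvSkips cs prev) k prev (prev + (cs.length : Int)) acc
      = acc ++ pvBuild cs prev (prev - k) := by
  induction cs with
  | nil =>
      intro prev k acc
      simp only [pvSkips_nil, pvBuild, List.length_nil, Int.natCast_zero, add_zero]
      simp [pvBgen, PySem.List.enumerate, PySem.List.pyRange_one_eq_nil (le_refl prev)]
  | cons c rest ih =>
      intro prev k acc
      have hlen : prev + ((c :: rest).length : Int) = (prev + 1) + (rest.length : Int) := by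
        push_cast [List.length_cons]; ring
      rw [pvSkips_cons, hlen]
      by_cases h : pvSkip c = true
      · rw [if_pos h, List.singleton_append]
        rw [pvBgen_skip, ih (prev + 1) (k + 1) (acc ++ [(prev, prev - k)])]
        have : prev + 1 - (k + 1) = prev - k := by ring
        rw [this]
        simp [pvBuild, h]
      · rw [if_neg h, List.nil_append]
        rw [pvBgen_pop (pvSkips rest (prev + 1)) k prev ((prev + 1) + (rest.length : Int))
              acc (fun j hj => pvSkips_ge rest (prev + 1) j hj) (by omega),
          ih (prev + 1) k (acc ++ [(prev, prev - k)])]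
        have : prev + 1 - k = prev - k + 1 := by ring
        rw [this]
        simp [pvBuild, h]

-- ===== VERDICT (by name: the statement is the Claim_ definition above) =====
theorem create_offset_map_py_spec : Claim_equal_create_offset_map_py := by
  intro text _
  unfold Spec_create_offset_map_py create_offset_map_py create_offset_map_py_alt
  rw [pvA_loop text.toList 0 [] 0]
  have hB := pvB_main text.toList 0 0 []
  rw [pvSkips, sub_zero] at hB
  simp only [zero_add] at hB
  rw [show PySem.Str.len text = (text.toList.length : Int) from by
    simp [PySem.Str.len_eq]]
  simpa [pvBgen] using hB.symm
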